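-- pv_equiv track=rewrite | github.com/andrewbells/python_learning | mephi/divisors.py | max_num_least
-- ===== SOURCE A (Python) =====
-- def max_num_least(a, b):
--     '''
--     here i decided to count all the values and number of divisors once more and
--     put them into a new separate LISTS, not dictionaries, since probably i lack skill of working with dict.
--     Otherwise this could be the only function of the program -- the above one returns nicer looking data
--     representation in dicts. Besides i dont define values of divisors in this function.
--     '''
--     master = []
--     num_div = []
--     values = []
--     #p = PrettyTable(["Number", "Divisors", "no Divisors"])
--     #p.padding_width = 1
--     for x in range(a, b + 1):
--         output = []
--         num_divisors = 0
--         output.append(x)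
--         values.append(x)
--         #p.add_row([x, '-', '-'])
--         for y in range(2, x + 1):
--             if x % y == 0 and x != y:
--                 num_divisors += 1
--                 #p.add_row([ '', y, ''])
--         #p.add_row([ '-', '-', num_divisors])
--         #p.add_row(['------','------','------'])
--
--
--         if num_divisors >= 1:
--             num_div.append(num_divisors)
--         '''if num_divisors == 0 is considered an option for the output of max_val,
--         then comment out two upper lines and remove hash tag from the line below'''
--         #num_div.append(num_divisors)
--
--
--         output.append(num_divisors)
--         master.append(output)
--     #print (p)
--     #print (master)
--     #print (values)
--     #print (num_div)
--     '''
--     note that i skipped zeros in num_divisors since we dont take values without divisors into account.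
--     if zeros should be included, then check upper comment.
--     as soon as i get all three lists filled we can start analyzing:
--     '''
--
--     val_min_div = []
--     for i in range(len(master)):
--         if master[i][1] == min(num_div):
--             val_min_div.append(master[i][0])
--     max_val = max(val_min_div)
--     print ('The max value from the interval, which has least amount of divisors is %d' % max_val)
--     return max_val
-- ===== SOURCE B (Python) =====
-- def max_num_least(a, b):
--     # Single streaming pass; per-number divisor count in O(sqrt(x)) by
--     # pairing each divisor y <= sqrt(x) with x // y.
--     best_cnt = None
--     best_val = None
--     lo = a if a > 4 else 4
--     for x in range(lo, b + 1):
--         c = 0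
--         y = 2
--         while y * y <= x:
--             if x % y == 0:
--                 c += 1 if y * y == x else 2
--             y += 1
--         if c == 0:
--             continue
--         if best_cnt is None or c <= best_cnt:
--             best_cnt = c
--             best_val = x
--     print('The max value from the interval, which has least amount of divisors is %d' % best_val)
--     return best_val
-- ===== Notes on version B (the rewrite author's own statement) =====
-- stated objective: faster
-- what changed: Replaces A's list-building pass plus a second pass that recomputes min() on every iteration by a single streaming pass that counts each number's proper divisors via sqrt divisor pairing and tracks the running (min-count, max-value).
import Mathlib
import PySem

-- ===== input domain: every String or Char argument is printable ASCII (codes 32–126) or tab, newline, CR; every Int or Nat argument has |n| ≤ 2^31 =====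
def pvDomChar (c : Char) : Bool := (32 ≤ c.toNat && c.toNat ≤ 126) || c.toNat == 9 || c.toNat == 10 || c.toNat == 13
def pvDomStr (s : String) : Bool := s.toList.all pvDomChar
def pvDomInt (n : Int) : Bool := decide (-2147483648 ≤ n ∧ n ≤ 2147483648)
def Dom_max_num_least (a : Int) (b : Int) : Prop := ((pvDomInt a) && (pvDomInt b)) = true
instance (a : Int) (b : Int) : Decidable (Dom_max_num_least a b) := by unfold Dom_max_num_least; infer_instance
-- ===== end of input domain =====

-- B replaces A's list building + per-index min() recomputation by one streaming pass that counts
-- proper divisors via sqrt pairing (objective: faster, measured).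
-- Equivalence is about the RETURN value only (both Pythons also print the result; neither
-- mutates its arguments).

-- ===== PORT A =====
-- inner loop 'for y in range(2, x + 1): if x % y == 0 and x != y: num_divisors += 1'
def mnlCount (x : Int) : Int :=
  (PySem.List.pyRange 2 (x + 1) 1).foldl
    (fun c y => if PySem.Int.mod x y = 0 ∧ x ≠ y then c + 1 else c) 0

-- outer loop body: state is (master, num_div, values)
def mnlStep (acc : List (Int × Int) × List Int × List Int) (x : Int) :
    List (Int × Int) × List Int × List Int :=
  let nd := mnlCount x
  (acc.1 ++ [(x, nd)],
   (if 1 ≤ nd then acc.2.1 ++ [nd] else acc.2.1),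
   acc.2.2 ++ [x])

def max_num_least (a : Int) (b : Int) : Int :=
  let st := (PySem.List.pyRange a (b + 1) 1).foldl mnlStep ([], [], [])
  let master := st.1
  let num_div := st.2.1
  -- 'for i in range(len(master)): if master[i][1] == min(num_div): val_min_div.append(master[i][0])'
  let val_min_div := (PySem.List.pyRange 0 (master.length : Int) 1).foldl
    (fun acc i =>
      let row := PySem.List.pyGetD master i (0, 0)
      if some row.2 = PySem.List.min? num_div (fun v => v) then acc ++ [row.1] else acc) []
  -- min(num_div) / max(val_min_div) raise ValueError on empty lists: excluded by Pre_; 0 is the unreachable default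
  (PySem.List.max? val_min_div (fun v => v)).getD 0

-- ===== PORT B =====
-- 'y = 2; while y * y <= x: if x % y == 0: c += 1 if y*y == x else 2; y += 1'
def sqrtCountLoop (x : Int) (y : Int) (c : Int) : Int :=
  if y * y ≤ x then
    sqrtCountLoop x (y + 1) (c + if PySem.Int.mod x y = 0 then (if y * y = x then 1 else 2) else 0)
  else c
  termination_by (x + 1 - y).toNat
  decreasing_by
    rename_i h
    have hyx : y ≤ x := by
      by_cases h0 : y ≤ 0
      · have := mul_self_nonneg y; omega
      · nlinarith
    omega

-- loop body: state is Option (best_cnt, best_val)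
def mnlAltStep (st : Option (Int × Int)) (x : Int) : Option (Int × Int) :=
  let c := sqrtCountLoop x 2 0
  if c = 0 then st
  else
    match st with
    | none => some (c, x)
    | some (bc, bv) => if c ≤ bc then some (c, x) else some (bc, bv)

def max_num_least_alt (a : Int) (b : Int) : Int :=
  let lo := if 4 < a then a else 4
  let best := (PySem.List.pyRange lo (b + 1) 1).foldl mnlAltStep none
  -- best = none ↔ no qualifying number: B's Python would fail on the print there (excluded by Pre_)
  match best with
  | some p => p.2
  | none => 0

-- ===== PRECONDITION & SPEC =====
-- Pre_ excludes exactly the inputs on which A raises ValueError (min()/max() of an empty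
-- list): intervals [a, b] containing no composite number ≥ 4.
def Pre_max_num_least (a : Int) (b : Int) : Prop :=
  ∃ x : Int, a ≤ x ∧ x ≤ b ∧ 4 ≤ x ∧ ¬ Nat.Prime x.toNat

-- decided via at most one primality test: a range holding two or more numbers ≥ 4 always
-- contains an even composite, so only the singleton case needs the test
instance (a : Int) (b : Int) : Decidable (Pre_max_num_least a b) :=
  decidable_of_iff
    (max a 4 ≤ b ∧ (max a 4 < b ∨ ¬ Nat.Prime (max a 4).toNat))
    (by
      unfold Pre_max_num_least
      have hcomp : ∀ x : Int, 4 ≤ x → (2 : Int) ∣ x → ¬ Nat.Prime x.toNat := by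
        intro x h4 h2 hp
        have h2n : 2 ∣ x.toNat := by omega
        rcases hp.eq_one_or_self_of_dvd 2 h2n with h | h <;> omega
      constructor
      · rintro ⟨hm, hor⟩
        rcases hor with hlt | hnp
        · refine ⟨if (2 : Int) ∣ max a 4 then max a 4 else max a 4 + 1, ?_, ?_, ?_, ?_⟩
          · split_ifs <;> [exact le_max_left a 4;
              exact le_trans (le_max_left a 4) (by omega)]
          · split_ifs <;> omega
          · split_ifs <;> [exact le_max_right a 4;
              exact le_trans (le_max_right a 4) (by omega)]
          · split_ifs with h2
            · exact hcomp _ (le_max_right a 4) h2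
            · exact hcomp _ (le_trans (le_max_right a 4) (by omega)) (by omega)
        · exact ⟨max a 4, le_max_left a 4, hm, le_max_right a 4, hnp⟩
      · rintro ⟨x, hax, hxb, h4, hnp⟩
        have hmx : max a 4 ≤ x := max_le hax h4
        refine ⟨le_trans hmx hxb, ?_⟩
        by_cases hlt : max a 4 < b
        · exact Or.inl hlt
        · right
          have hxeq : x = max a 4 := by omega
          rw [← hxeq]
          exact hnp)

def pvWitness_max_num_least : Int × Int := (3, 10)

def Spec_max_num_least (a : Int) (b : Int) (out : Int) : Prop := out = max_num_least_alt a b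
instance (a : Int) (b : Int) (out : Int) : Decidable (Spec_max_num_least a b out) := by
  unfold Spec_max_num_least; infer_instance

-- ===== CLAIM (what is proved, stated in full; the proofs are below) =====
def Claim_equal_max_num_least : Prop := ∀ (a : Int) (b : Int), Dom_max_num_least a b → Pre_max_num_least a b → Spec_max_num_least a b (max_num_least a b)

-- ===== LEMMAS AND PROOFS =====

-- weight of a candidate divisor t ≤ √x in B's pairing count
def pvW (x t : Int) : Int := if t ∣ x then (if t * t = x then 1 else 2) else 0

theorem mnlCount_eq_card (x : Int) :
    mnlCount x = (((Finset.Ico 2 x).filter (fun y => y ∣ x)).card : Int) := by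
  unfold mnlCount
  rw [PySem.List.foldl_ite_add_one]
  have hnd := PySem.List.nodup_pyRange_one (a := 2) (b := x + 1)
  rw [List.countP_eq_length_filter, ← List.toFinset_card_of_nodup (hnd.filter _),
    List.toFinset_filter]
  have htf : (PySem.List.pyRange 2 (x + 1) 1).toFinset = Finset.Ico 2 (x + 1) := by
    ext y
    simp [PySem.List.mem_pyRange_one, Finset.mem_Ico]
  rw [htf]
  have : (Finset.Ico 2 (x + 1)).filter (fun y => decide (PySem.Int.mod x y = 0 ∧ x ≠ y))
      = (Finset.Ico 2 x).filter (fun y => y ∣ x) := by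
    ext y
    simp only [Finset.mem_filter, Finset.mem_Ico, decide_eq_true_eq]
    constructor
    · rintro ⟨⟨h2, hx1⟩, hm, hne⟩
      have : y ∣ x := (PySem.Int.mod_eq_zero_iff_dvd x y).mp hm
      exact ⟨⟨h2, by omega⟩, this⟩
    · rintro ⟨⟨h2, hlt⟩, hd⟩
      exact ⟨⟨h2, by omega⟩, (PySem.Int.mod_eq_zero_iff_dvd x y).mpr hd, by omega⟩
  rw [this]; ring

theorem mnlCount_nonneg (x : Int) : 0 ≤ mnlCount x := by
  rw [mnlCount_eq_card]; positivity

theorem mnlCount_small {x : Int} (hx : x ≤ 3) : mnlCount x = 0 := by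
  rw [mnlCount_eq_card]
  have : (Finset.Ico 2 x).filter (fun y => y ∣ x) = ∅ := by
    rw [Finset.filter_eq_empty_iff]
    intro y hy
    rw [Finset.mem_Ico] at hy
    intro hd
    obtain ⟨hx3, hy2⟩ : x = 3 ∧ y = 2 := by omega
    subst hx3; subst hy2
    norm_num at hd
  simp [this]

theorem sqrtCountLoop_eq (x : Int) :
    ∀ (y c : Int), 2 ≤ y →
      sqrtCountLoop x y c = c + ∑ t ∈ (Finset.Ico y x).filter (fun t => t * t ≤ x), pvW x t := by
  intro y c hy
  induction hk : (x + 1 - y).toNat using Nat.strong_induction_on generalizing y c with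
  | _ n ih =>
  rw [sqrtCountLoop]
  by_cases h : y * y ≤ x
  · have hyx : y < x := by nlinarith
    rw [if_pos h]
    have hterm : (x + 1 - (y + 1)).toNat < n := by omega
    rw [ih _ hterm (y + 1) _ (by omega) rfl]
    have hsplit : (Finset.Ico y x).filter (fun t => t * t ≤ x)
        = insert y ((Finset.Ico (y + 1) x).filter (fun t => t * t ≤ x)) := by
      ext t
      simp only [Finset.mem_insert, Finset.mem_filter, Finset.mem_Ico]
      constructor
      · rintro ⟨⟨h1, h2⟩, h3⟩
        rcases eq_or_lt_of_le h1 with rfl | hlt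
        · exact Or.inl rfl
        · exact Or.inr ⟨⟨by omega, h2⟩, h3⟩
      · rintro (rfl | ⟨⟨h1, h2⟩, h3⟩)
        · exact ⟨⟨le_refl _, hyx⟩, h⟩
        · exact ⟨⟨by omega, h2⟩, h3⟩
    rw [hsplit, Finset.sum_insert (by
      simp only [Finset.mem_filter, Finset.mem_Ico]
      intro h
      omega)]
    unfold pvW
    simp only [PySem.Int.mod_eq_zero_iff_dvd]
    split_ifs <;> ring
  · rw [if_neg h]
    have : (Finset.Ico y x).filter (fun t => t * t ≤ x) = ∅ := by
      rw [Finset.filter_eq_empty_iff]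
      intro t ht
      rw [Finset.mem_Ico] at ht
      intro htt
      have : y * y ≤ t * t := by nlinarith [ht.1]
      omega
    simp [this]


theorem pvW_pairing (x : Int) :
    ∑ t ∈ (Finset.Ico 2 x).filter (fun t => t * t ≤ x), pvW x t
      = (((Finset.Ico 2 x).filter (fun t => t ∣ x)).card : Int) := by
  classical
  set S := Finset.Ico 2 x with hS
  set Dlt := S.filter (fun t => t ∣ x ∧ t * t < x) with hDlt
  set Deq := S.filter (fun t => t ∣ x ∧ t * t = x) with hDeq
  set Dhi := S.filter (fun t => t ∣ x ∧ x < t * t) with hDhi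
  set D := S.filter (fun t => t ∣ x) with hD
  -- LHS = |Deq| + 2 * |Dlt|
  have hL : ∑ t ∈ S.filter (fun t => t * t ≤ x), pvW x t
      = (Deq.card : Int) + 2 * (Dlt.card : Int) := by
    have h1 : ∑ t ∈ S.filter (fun t => t * t ≤ x), pvW x t
        = ∑ t ∈ (S.filter (fun t => t * t ≤ x)).filter (fun t => t ∣ x),
            (if t * t = x then (1 : Int) else 2) := by
      rw [Finset.sum_filter (fun t => t ∣ x)]
      apply Finset.sum_congr rfl
      intro t _
      unfold pvW
      split_ifs <;> rfl
    rw [h1]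
    have h2 : (S.filter (fun t => t * t ≤ x)).filter (fun t => t ∣ x)
        = Deq ∪ Dlt := by
      ext t
      simp only [Finset.mem_filter, Finset.mem_union, hDeq, hDlt]
      constructor
      · rintro ⟨⟨hts, htt⟩, htd⟩
        rcases eq_or_lt_of_le htt with he | hl
        · exact Or.inl ⟨hts, htd, he⟩
        · exact Or.inr ⟨hts, htd, hl⟩
      · rintro (⟨hts, htd, he⟩ | ⟨hts, htd, hl⟩) <;> exact ⟨⟨hts, by omega⟩, htd⟩
    have hdisj : Disjoint Deq Dlt := by
      rw [hDeq, hDlt, Finset.disjoint_filter]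
      intro t _ h1 h2
      omega
    rw [h2, Finset.sum_union hdisj]
    have he : ∑ t ∈ Deq, (if t * t = x then (1 : Int) else 2) = (Deq.card : Int) := by
      rw [Finset.sum_congr rfl (g := fun _ => (1 : Int)) (by
        intro t ht
        rw [hDeq, Finset.mem_filter] at ht
        rw [if_pos ht.2.2])]
      simp
    have hl : ∑ t ∈ Dlt, (if t * t = x then (1 : Int) else 2) = 2 * (Dlt.card : Int) := by
      rw [Finset.sum_congr rfl (g := fun _ => (2 : Int)) (by
        intro t ht
        rw [hDlt, Finset.mem_filter] at ht
        rw [if_neg (by omega)])]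
      simp [mul_comm]
    rw [he, hl]
  -- |Dhi| = |Dlt| by the pairing t ↦ x / t
  have hbij : Dhi.card = Dlt.card := by
    apply Finset.card_nbij' (fun t => x / t) (fun t => x / t)
    · intro t ht
      simp only [Finset.coe_filter, Set.mem_setOf_eq, hDhi, hDlt, hS, Finset.mem_Ico] at ht ⊢
      obtain ⟨⟨h2, hlt⟩, hd, hhi⟩ := ht
      obtain ⟨k, hk⟩ := hd
      have hkq : x / t = k := by rw [hk, Int.mul_ediv_cancel_left _ (by omega)]
      have hx0 : (0 : Int) < x := by omega
      have hk0 : 0 < k := by nlinarith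
      have hklt : k < t := by nlinarith
      have hk2 : 2 ≤ k := by nlinarith
      rw [hkq]
      exact ⟨⟨hk2, by omega⟩, ⟨t, by rw [hk]; ring⟩, by nlinarith⟩
    · intro t ht
      simp only [Finset.coe_filter, Set.mem_setOf_eq, hDhi, hDlt, hS, Finset.mem_Ico] at ht ⊢
      obtain ⟨⟨h2, hlt⟩, hd, hlo⟩ := ht
      obtain ⟨k, hk⟩ := hd
      have hkq : x / t = k := by rw [hk, Int.mul_ediv_cancel_left _ (by omega)]
      have hx0 : (0 : Int) < x := by omega
      have hk0 : 0 < k := by nlinarith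
      have hkt : t < k := by nlinarith
      rw [hkq]
      exact ⟨⟨by omega, by nlinarith⟩, ⟨t, by rw [hk]; ring⟩, by nlinarith⟩
    · intro t ht
      simp only [Finset.coe_filter, Set.mem_setOf_eq, hDhi, hS, Finset.mem_Ico] at ht
      obtain ⟨⟨h2, hlt⟩, hd, _⟩ := ht
      obtain ⟨k, hk⟩ := hd
      have hkq : x / t = k := by rw [hk, Int.mul_ediv_cancel_left _ (by omega)]
      have hx0 : (0 : Int) < x := by omega
      have hk0 : 0 < k := by nlinarith
      show x / (x / t) = t
      rw [hkq, hk, Int.mul_ediv_cancel _ (by omega)]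
    · intro t ht
      simp only [Finset.coe_filter, Set.mem_setOf_eq, hDlt, hS, Finset.mem_Ico] at ht
      obtain ⟨⟨h2, hlt⟩, hd, _⟩ := ht
      obtain ⟨k, hk⟩ := hd
      have hkq : x / t = k := by rw [hk, Int.mul_ediv_cancel_left _ (by omega)]
      have hx0 : (0 : Int) < x := by omega
      have hk0 : 0 < k := by nlinarith
      show x / (x / t) = t
      rw [hkq, hk, Int.mul_ediv_cancel _ (by omega)]
  -- |D| = |Deq| + |Dlt| + |Dhi|
  have hsplit : D.card = (Deq.card + Dlt.card) + Dhi.card := by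
    have h1 : (D.filter (fun t => t * t ≤ x)).card + (D.filter (fun t => ¬ t * t ≤ x)).card
        = D.card := Finset.card_filter_add_card_filter_not _
    have h2 : D.filter (fun t => t * t ≤ x) = Deq ∪ Dlt := by
      ext t
      simp only [Finset.mem_filter, Finset.mem_union, hDeq, hDlt, hD]
      constructor
      · rintro ⟨⟨hts, htd⟩, htt⟩
        rcases eq_or_lt_of_le htt with he | hl
        · exact Or.inl ⟨hts, htd, he⟩
        · exact Or.inr ⟨hts, htd, hl⟩
      · rintro (⟨hts, htd, he⟩ | ⟨hts, htd, hl⟩) <;> exact ⟨⟨hts, htd⟩, by omega⟩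
    have h3 : D.filter (fun t => ¬ t * t ≤ x) = Dhi := by
      ext t
      simp only [Finset.mem_filter, hDhi, hD]
      constructor
      · rintro ⟨⟨hts, htd⟩, htt⟩
        exact ⟨hts, htd, by omega⟩
      · rintro ⟨hts, htd, hgt⟩
        exact ⟨⟨hts, htd⟩, by omega⟩
    have hdisj : Disjoint Deq Dlt := by
      rw [hDeq, hDlt, Finset.disjoint_filter]
      intro t _ ha hb
      omega
    rw [← h1, h2, h3, Finset.card_union_of_disjoint hdisj]
  rw [hL, hsplit, hbij]
  push_cast
  ring

theorem sqrtCount_eq_mnlCount (x : Int) : sqrtCountLoop x 2 0 = mnlCount x := by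
  rw [sqrtCountLoop_eq x 2 0 (by norm_num), mnlCount_eq_card, pvW_pairing]
  ring

-- characterization of A's first loop
theorem foldA_char (L : List Int) (m0 : List (Int × Int)) (n0 v0 : List Int) :
    L.foldl mnlStep (m0, n0, v0)
      = (m0 ++ L.map (fun x => (x, mnlCount x)),
         n0 ++ (L.map mnlCount).filter (fun v => decide (1 ≤ v)),
         v0 ++ L) := by
  induction L generalizing m0 n0 v0 with
  | nil => simp
  | cons x L ih =>
    simp only [List.foldl_cons, List.map_cons, List.filter_cons]
    rw [show mnlStep (m0, n0, v0) x
        = (m0 ++ [(x, mnlCount x)],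
           (if 1 ≤ mnlCount x then n0 ++ [mnlCount x] else n0), v0 ++ [x]) from rfl]
    rw [ih]
    by_cases h : 1 ≤ mnlCount x <;> simp [h]

-- 'if p(row): out.append(row.1)' over a list, Prop test
theorem foldl_append_ite_map {α β : Type} (p : α → Prop) [DecidablePred p] (f : α → β) :
    ∀ (l : List α) (acc : List β),
      l.foldl (fun acc x => if p x then acc ++ [f x] else acc) acc
        = acc ++ (l.filter (fun x => decide (p x))).map f := by
  intro l
  induction l with
  | nil => simp
  | cons x t ih =>
    intro acc
    simp only [List.foldl_cons, List.filter_cons]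
    by_cases h : p x <;> simp [h, ih]

theorem min?_id_append_singleton (xs : List Int) (v : Int) :
    PySem.List.min? (xs ++ [v]) (fun y => y)
      = some (match PySem.List.min? xs (fun y => y) with | none => v | some m => min m v) := by
  cases xs with
  | nil => simp [PySem.List.min?_id_cons, show PySem.List.min? ([] : List Int) (fun y => y) = none from rfl]
  | cons x t =>
    rw [List.cons_append, PySem.List.min?_id_cons, PySem.List.min?_id_cons]
    simp [List.foldl_append]

theorem max?_id_append_singleton (xs : List Int) (v : Int) :
    PySem.List.max? (xs ++ [v]) (fun y => y)
      = some (match PySem.List.max? xs (fun y => y) with | none => v | some m => max m v) := by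
  cases xs with
  | nil => simp [PySem.List.max?_id_cons, show PySem.List.max? ([] : List Int) (fun y => y) = none from rfl]
  | cons x t =>
    rw [List.cons_append, PySem.List.max?_id_cons, PySem.List.max?_id_cons]
    simp [List.foldl_append]

-- B's loop body with the count already rewritten to A's count
def pvAltStepC (st : Option (Int × Int)) (x : Int) : Option (Int × Int) :=
  if mnlCount x = 0 then st
  else
    match st with
    | none => some (mnlCount x, x)
    | some (bc, bv) => if mnlCount x ≤ bc then some (mnlCount x, x) else some (bc, bv)

theorem mnlAltStep_eq : mnlAltStep = pvAltStepC := by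
  funext st x
  unfold mnlAltStep pvAltStepC
  rw [sqrtCount_eq_mnlCount]

-- running (min-count, max-value) pass = min-then-argmax of A's lists
theorem foldB_char (L : List Int) (hL : L.Pairwise (· < ·)) :
    (PySem.List.min? ((L.map mnlCount).filter (fun v => decide (1 ≤ v))) (fun y => y) = none →
      L.foldl pvAltStepC none = none)
    ∧ (∀ m, PySem.List.min? ((L.map mnlCount).filter (fun v => decide (1 ≤ v))) (fun y => y) = some m →
      ∃ v, L.foldl pvAltStepC none = some (m, v) ∧
        PySem.List.max? (L.filter (fun x => decide (mnlCount x = m))) (fun y => y) = some v) := by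
  induction L using List.reverseRecOn with
  | nil =>
    constructor
    · intro _; rfl
    · intro m hm; simp [show PySem.List.min? ([] : List Int) (fun y => y) = none from rfl] at hm
  | append_singleton L x ih =>
    rw [List.pairwise_append] at hL
    obtain ⟨hLp, -, hlt⟩ := hL
    have hltx : ∀ a ∈ L, a < x := fun a ha => hlt a ha x (by simp)
    obtain ⟨ih0, ih1⟩ := ih hLp
    have hfold : (L ++ [x]).foldl pvAltStepC none = pvAltStepC (L.foldl pvAltStepC none) x := by
      simp [List.foldl_append]
    have hmap : ((L ++ [x]).map mnlCount).filter (fun v => decide (1 ≤ v))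
        = (L.map mnlCount).filter (fun v => decide (1 ≤ v))
          ++ (if 1 ≤ mnlCount x then [mnlCount x] else []) := by
      by_cases h : 1 ≤ mnlCount x <;> simp [List.filter_append, h]
    have hfx : ∀ m : Int, mnlCount x ≠ m →
        (L ++ [x]).filter (fun a => decide (mnlCount a = m))
          = L.filter (fun a => decide (mnlCount a = m)) := by
      intro m hne; simp [List.filter_append, hne]
    rcases (by have := mnlCount_nonneg x; omega : mnlCount x = 0 ∨ 1 ≤ mnlCount x) with hc0 | hc1
    · -- count 0: x is skipped everywhere
      rw [hfold, hmap, if_neg (by omega), List.append_nil]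
      constructor
      · intro hnone
        rw [ih0 hnone, pvAltStepC, if_pos hc0]
      · intro m hm
        obtain ⟨v, hv, hmax⟩ := ih1 m hm
        have hm1 : 1 ≤ m := by
          have := PySem.List.min?_mem hm
          simp only [List.mem_filter, decide_eq_true_eq] at this
          exact this.2
        refine ⟨v, ?_, ?_⟩
        · rw [hv, pvAltStepC, if_pos hc0]
        · rw [hfx m (by omega)]; exact hmax
    · -- count ≥ 1
      rw [hfold, hmap, if_pos hc1]
      rcases hmin : PySem.List.min? ((L.map mnlCount).filter (fun v => decide (1 ≤ v))) (fun y => y)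
        with - | m
      · -- nothing qualified before x
        have hLf : (L.map mnlCount).filter (fun v => decide (1 ≤ v)) = [] :=
          (PySem.List.min?_eq_none_iff _ _).mp hmin
        have hnew : PySem.List.min? ([] ++ [mnlCount x]) (fun y => y) = some (mnlCount x) := by
          simp [PySem.List.min?_id_cons]
        rw [hLf]
        constructor
        · intro hnone
          rw [hnew] at hnone; cases hnone
        · intro m hm
          rw [hnew] at hm
          obtain rfl : mnlCount x = m := by injection hm
          refine ⟨x, ?_, ?_⟩
          · rw [ih0 hmin, pvAltStepC, if_neg (by omega)]
          · have hLe : L.filter (fun a => decide (mnlCount a = mnlCount x)) = [] := by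
              rw [List.filter_eq_nil_iff]
              intro a ha
              simp only [decide_eq_true_eq]
              intro hca
              have : mnlCount a ∈ (L.map mnlCount).filter (fun v => decide (1 ≤ v)) := by
                simp only [List.mem_filter, List.mem_map, decide_eq_true_eq]
                exact ⟨⟨a, ha, rfl⟩, by omega⟩
              rw [hLf] at this; cases this
            rw [List.filter_append, hLe, List.nil_append]
            simp [PySem.List.max?_id_cons]
      · -- previous minimum m
        obtain ⟨v, hv, hmax⟩ := ih1 m hmin
        have hm1 : 1 ≤ m := by
          have := PySem.List.min?_mem hmin
          simp only [List.mem_filter, decide_eq_true_eq] at this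
          exact this.2
        have hvL : v ∈ L := by
          have := PySem.List.max?_mem hmax
          exact (List.mem_filter.mp this).1
        have hnew := min?_id_append_singleton
          ((L.map mnlCount).filter (fun v => decide (1 ≤ v))) (mnlCount x)
        rw [hmin] at hnew
        rw [hv]
        rcases lt_trichotomy (mnlCount x) m with hcm | hcm | hcm
        · -- new strict minimum: x wins alone
          have hnew' : PySem.List.min?
              ((L.map mnlCount).filter (fun v => decide (1 ≤ v)) ++ [mnlCount x]) (fun y => y)
              = some (mnlCount x) := by
            rw [hnew]; simp [min_eq_right hcm.le]
          constructor
          · intro hnone; rw [hnew'] at hnone; cases hnone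
          · intro m' hm'
            rw [hnew'] at hm'
            obtain rfl : mnlCount x = m' := Option.some.inj hm'
            refine ⟨x, ?_, ?_⟩
            · rw [pvAltStepC, if_neg (by omega)]
              simp only [if_pos (by omega : mnlCount x ≤ m)]
            · have hLe : L.filter (fun a => decide (mnlCount a = mnlCount x)) = [] := by
                rw [List.filter_eq_nil_iff]
                intro a ha
                simp only [decide_eq_true_eq]
                intro hca
                have hmem : mnlCount a ∈ (L.map mnlCount).filter (fun v => decide (1 ≤ v)) := by
                  simp only [List.mem_filter, List.mem_map, decide_eq_true_eq]
                  exact ⟨⟨a, ha, rfl⟩, by omega⟩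
                have := PySem.List.min?_isMin hmin _ hmem
                simp only at this
                omega
              rw [List.filter_append, hLe, List.nil_append]
              simp [PySem.List.max?_id_cons]
        · -- equal minimum: x is later, so it wins the tie
          subst hcm
          have hnew' : PySem.List.min?
              ((L.map mnlCount).filter (fun v => decide (1 ≤ v)) ++ [mnlCount x]) (fun y => y)
              = some (mnlCount x) := by
            rw [hnew]; simp
          constructor
          · intro hnone; rw [hnew'] at hnone; cases hnone
          · intro m' hm'
            rw [hnew'] at hm'
            obtain rfl : mnlCount x = m' := Option.some.inj hm'
            refine ⟨x, ?_, ?_⟩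
            · rw [pvAltStepC, if_neg (by omega)]
              simp only [if_pos (le_refl (mnlCount x))]
            · have hfapp : (L ++ [x]).filter (fun a => decide (mnlCount a = mnlCount x))
                  = L.filter (fun a => decide (mnlCount a = mnlCount x)) ++ [x] := by
                simp [List.filter_append]
              rw [hfapp]
              have hmx := max?_id_append_singleton
                (L.filter (fun a => decide (mnlCount a = mnlCount x))) x
              rw [hmax] at hmx
              simp only at hmx
              rw [hmx, max_eq_right (le_of_lt (hltx v hvL))]
        · -- x's count is worse: state unchanged
          have hnew' : PySem.List.min?
              ((L.map mnlCount).filter (fun v => decide (1 ≤ v)) ++ [mnlCount x]) (fun y => y)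
              = some m := by
            rw [hnew]; simp [min_eq_left hcm.le]
          constructor
          · intro hnone; rw [hnew'] at hnone; cases hnone
          · intro m' hm'
            rw [hnew'] at hm'
            obtain rfl : m = m' := Option.some.inj hm'
            refine ⟨v, ?_, ?_⟩
            · rw [pvAltStepC, if_neg (by omega)]
              simp only [if_neg (by omega : ¬ mnlCount x ≤ m)]
            · rw [hfx m (by omega)]; exact hmax

theorem ports_eq (a b : Int) : max_num_least a b = max_num_least_alt a b := by
  unfold max_num_least max_num_least_alt
  rw [mnlAltStep_eq]
  simp only [foldA_char, List.nil_append]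
  rw [PySem.List.foldl_pyRange_zero_pyGetD'
      ((PySem.List.pyRange a (b + 1) 1).map (fun x => (x, mnlCount x))) ((0 : Int), (0 : Int))
      (fun acc (row : Int × Int) =>
        if some row.2 = PySem.List.min?
            ((List.map mnlCount (PySem.List.pyRange a (b + 1) 1)).filter (fun v => decide (1 ≤ v)))
            (fun v => v)
          then acc ++ [row.1] else acc)
      ([] : List Int)]
  rw [foldl_append_ite_map
      (fun (row : Int × Int) => some row.2 = PySem.List.min?
        ((List.map mnlCount (PySem.List.pyRange a (b + 1) 1)).filter (fun v => decide (1 ≤ v)))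
        (fun v => v))
      (fun (row : Int × Int) => row.1)]
  rw [List.filter_map, List.map_map, List.nil_append]
  simp only [Function.comp_def, List.map_id']
  set lo := (if 4 < a then a else (4 : Int)) with hlo
  have key : ((PySem.List.pyRange a (b + 1) 1).map mnlCount).filter (fun v => decide (1 ≤ v))
        = ((PySem.List.pyRange lo (b + 1) 1).map mnlCount).filter (fun v => decide (1 ≤ v))
      ∧ ∀ m : Int, 1 ≤ m →
        (PySem.List.pyRange a (b + 1) 1).filter (fun x => decide (mnlCount x = m))
          = (PySem.List.pyRange lo (b + 1) 1).filter (fun x => decide (mnlCount x = m)) := by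
    by_cases h4 : 4 < a
    · rw [hlo, if_pos h4]
      exact ⟨rfl, fun m _ => rfl⟩
    · have hlo4 : lo = 4 := by rw [hlo, if_neg h4]
      by_cases hb : 4 ≤ b + 1
      · have hsp := PySem.List.pyRange_one_append a 4 (b + 1) (by omega) hb
        have hzero : ∀ z ∈ PySem.List.pyRange a 4 1, mnlCount z = 0 := by
          intro z hz
          exact mnlCount_small (by have := PySem.List.mem_pyRange_one.mp hz; omega)
        rw [hlo4, hsp]
        constructor
        · rw [List.map_append, List.filter_append]
          have hnil : ((PySem.List.pyRange a 4 1).map mnlCount).filter (fun v => decide (1 ≤ v))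
              = [] := by
            rw [List.filter_eq_nil_iff]
            intro v hv
            rw [List.mem_map] at hv
            obtain ⟨z, hz, rfl⟩ := hv
            simp [hzero z hz]
          rw [hnil, List.nil_append]
        · intro m hm
          rw [List.filter_append]
          have hnil : (PySem.List.pyRange a 4 1).filter (fun x => decide (mnlCount x = m))
              = [] := by
            rw [List.filter_eq_nil_iff]
            intro z hz
            have := hzero z hz
            simp only [decide_eq_true_eq]
            omega
          rw [hnil, List.nil_append]
      · have hL' : PySem.List.pyRange lo (b + 1) 1 = [] :=
          PySem.List.pyRange_one_eq_nil (by omega)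
        have hzero : ∀ z ∈ PySem.List.pyRange a (b + 1) 1, mnlCount z = 0 := by
          intro z hz
          exact mnlCount_small (by have := PySem.List.mem_pyRange_one.mp hz; omega)
        rw [hL']
        constructor
        · simp only [List.map_nil, List.filter_nil]
          rw [List.filter_eq_nil_iff]
          intro v hv
          rw [List.mem_map] at hv
          obtain ⟨z, hz, rfl⟩ := hv
          simp [hzero z hz]
        · intro m hm
          simp only [List.filter_nil]
          rw [List.filter_eq_nil_iff]
          intro z hz
          have := hzero z hz
          simp only [decide_eq_true_eq]
          omega
  obtain ⟨hp, hq⟩ := key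
  rw [hp]
  obtain ⟨f0, f1⟩ := foldB_char (PySem.List.pyRange lo (b + 1) 1)
    (PySem.List.pairwise_lt_pyRange_one lo (b + 1))
  rcases hmin : PySem.List.min?
      (((PySem.List.pyRange lo (b + 1) 1).map mnlCount).filter (fun v => decide (1 ≤ v)))
      (fun v => v) with - | m
  · rw [f0 hmin]
    have hfe : (PySem.List.pyRange a (b + 1) 1).filter
        (fun x => decide (some (mnlCount x) = none)) = [] := by simp
    rw [hfe]
    rfl
  · obtain ⟨v, hv, hmax⟩ := f1 m hmin
    have hm1 : 1 ≤ m := by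
      have := PySem.List.min?_mem hmin
      simp only [List.mem_filter, decide_eq_true_eq] at this
      exact this.2
    rw [hv]
    have hcongr : (PySem.List.pyRange a (b + 1) 1).filter
          (fun x => decide (some (mnlCount x) = some m))
        = (PySem.List.pyRange a (b + 1) 1).filter (fun x => decide (mnlCount x = m)) := by
      apply List.filter_congr
      intro x _
      simp
    rw [hcongr, hq m hm1, hmax]
    rfl

-- ===== VERDICT (by name: the statement is the Claim_ definition above) =====
theorem max_num_least_spec : Claim_equal_max_num_least := by
  intro a b _ _
  unfold Spec_max_num_least
  exact ports_eq a b
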